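-- pv_equiv track=rewrite | github.com/julia0922/CRC_Test_Project | dui/sbc_asr_multiprocess.py | getargvalue
-- ===== SOURCE A (Python) =====
-- def getargvalue(index,step_list):
--     fistagr=0
--     secondarg=0
--     for i in range(0, index):
--         fistagr=fistagr+step_list[i]
--
--     for i in range(0, index+1):
--         secondarg=secondarg+step_list[i]
--     return fistagr,secondarg
-- ===== SOURCE B (Python) =====
-- def getargvalue(index, step_list):
--     fistagr = 0
--     total = 0
--     for i in range(0, index + 1):
--         if i == index:
--             fistagr = total
--         total = total + step_list[i]
--     return fistagr, total
-- ===== Notes on version B (the rewrite author's own statement) =====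
-- stated objective: alternative
-- what changed: Replaces A's two separate prefix-sum loops (over range(index) and range(index+1)) by a single loop over range(index+1) maintaining one running total, recording fistagr just before the last addition.
import Mathlib
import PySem

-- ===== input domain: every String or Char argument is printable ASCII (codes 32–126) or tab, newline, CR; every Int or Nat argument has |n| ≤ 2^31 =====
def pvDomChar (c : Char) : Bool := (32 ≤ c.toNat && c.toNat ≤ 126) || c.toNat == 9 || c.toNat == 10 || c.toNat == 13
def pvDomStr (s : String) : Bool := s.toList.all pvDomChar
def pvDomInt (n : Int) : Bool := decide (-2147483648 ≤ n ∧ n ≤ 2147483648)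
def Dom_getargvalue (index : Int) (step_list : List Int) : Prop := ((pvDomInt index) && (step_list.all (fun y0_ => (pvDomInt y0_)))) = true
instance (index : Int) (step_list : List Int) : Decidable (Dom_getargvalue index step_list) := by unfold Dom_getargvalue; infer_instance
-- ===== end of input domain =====

-- B merges A's two prefix-sum loops into one loop with a single running total; return values only, no side effects.

-- ===== PORT A =====
-- two separate accumulation loops, as in the Python
def getargvalue (index : Int) (step_list : List Int) : Int × Int :=
  let fistagr := (PySem.List.pyRange 0 index 1).foldl
    (fun acc i => acc + PySem.List.pyGetD step_list i 0) 0
  let secondarg := (PySem.List.pyRange 0 (index + 1) 1).foldl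
    (fun acc i => acc + PySem.List.pyGetD step_list i 0) 0
  (fistagr, secondarg)

-- ===== PORT B =====
-- one loop, state (fistagr, total); fistagr is recorded when i == index
def getargvalue_alt (index : Int) (step_list : List Int) : Int × Int :=
  (PySem.List.pyRange 0 (index + 1) 1).foldl
    (fun (p : Int × Int) i =>
      (if i == index then p.2 else p.1, p.2 + PySem.List.pyGetD step_list i 0))
    (0, 0)

-- ===== PRECONDITION & SPEC =====
-- Pre_ excludes exactly the inputs where Python A raises IndexError: index ≥ len(step_list).
def Pre_getargvalue (index : Int) (step_list : List Int) : Prop := index < (step_list.length : Int)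
instance (index : Int) (step_list : List Int) : Decidable (Pre_getargvalue index step_list) := by unfold Pre_getargvalue; infer_instance
def pvWitness_getargvalue : Int × List Int := (2, [3, -1, 4])
def Spec_getargvalue (index : Int) (step_list : List Int) (out : Int × Int) : Prop := out = getargvalue_alt index step_list
instance (index : Int) (step_list : List Int) (out : Int × Int) : Decidable (Spec_getargvalue index step_list out) := by unfold Spec_getargvalue; infer_instance

-- ===== CLAIM (what is proved, stated in full; the proofs are below) =====
def Claim_equal_getargvalue : Prop := ∀ (index : Int) (step_list : List Int), Dom_getargvalue index step_list → Pre_getargvalue index step_list → Spec_getargvalue index step_list (getargvalue index step_list)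

-- ===== LEMMAS AND PROOFS =====

-- B's fold over indices strictly below `index` never fires the `if`: the first
-- component stays fixed and the second accumulates the plain sum.
theorem alt_foldl_no_hit (step_list : List Int) (index : Int) (l : List Int)
    (hl : ∀ i ∈ l, i ≠ index) (a b : Int) :
    l.foldl (fun (p : Int × Int) i =>
        (if i == index then p.2 else p.1, p.2 + PySem.List.pyGetD step_list i 0)) (a, b)
    = (a, l.foldl (fun acc i => acc + PySem.List.pyGetD step_list i 0) b) := by
  induction l generalizing b with
  | nil => rfl
  | cons x xs ih =>
    have hx : x ≠ index := hl x (by simp)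
    have hxb : (x == index) = false := by simpa using hx
    simp only [List.foldl_cons, hxb, Bool.false_eq_true, if_false]
    exact ih (fun i hi => hl i (by simp [hi])) _

theorem getargvalue_spec' (index : Int) (step_list : List Int)
    (_h : Pre_getargvalue index step_list) :
    getargvalue index step_list = getargvalue_alt index step_list := by
  unfold getargvalue getargvalue_alt
  by_cases hneg : index < 0
  · rw [PySem.List.pyRange_one_eq_nil (by omega), PySem.List.pyRange_one_eq_nil (by omega)]
    rfl
  · have h0 : (0 : Int) ≤ index := by omega
    rw [PySem.List.pyRange_one_succ_right h0, List.foldl_append, List.foldl_append,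
        alt_foldl_no_hit step_list index (PySem.List.pyRange 0 index)
          (fun i hi => by
            have := (PySem.List.mem_pyRange_one (a := 0) (b := index) (x := i)).1 hi
            omega)]
    simp

-- ===== VERDICT (by name: the statement is the Claim_ definition above) =====
theorem getargvalue_spec : Claim_equal_getargvalue := by
  intro index step_list _ hpre
  exact getargvalue_spec' index step_list hpre
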